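-- pv_equiv track=rewrite | github.com/amsb14/CampusAutoAssistant | utils/analyze_compliance.py | calculate_past_terms
-- ===== SOURCE A (Python) =====
-- def calculate_past_terms(term):
--     new_term = str(term)[1:5]
--     year = int(new_term[:3])
--     half = int(new_term[3])
--     past_terms = []
--
--     for _ in range(4):
--         if half == 2:
--             half = 1
--         else:
--             half = 2
--             year -= 1
--         past_terms.append(f"{year}{half}")
--
--     return new_term, past_terms
-- ===== SOURCE B (Python) =====
-- def calculate_past_terms(term):
--     new_term = str(term)[1:5]
--     year = int(new_term[:3])
--     half = int(new_term[3])
--     idx = year * 2 + (1 if half == 2 else 0)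
--     past_terms = [f"{(idx - j) // 2}{(idx - j) % 2 + 1}" for j in range(1, 5)]
--     return new_term, past_terms
-- ===== Notes on version B (the rewrite author's own statement) =====
-- stated objective: alternative
-- what changed: Replaces the stateful 4-iteration half/year decrement loop with direct index arithmetic: one linear term index idx = year*2 + [half==2], and each past term computed independently as ((idx-j)//2, (idx-j)%2+1) for j in 1..4.
import Mathlib
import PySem

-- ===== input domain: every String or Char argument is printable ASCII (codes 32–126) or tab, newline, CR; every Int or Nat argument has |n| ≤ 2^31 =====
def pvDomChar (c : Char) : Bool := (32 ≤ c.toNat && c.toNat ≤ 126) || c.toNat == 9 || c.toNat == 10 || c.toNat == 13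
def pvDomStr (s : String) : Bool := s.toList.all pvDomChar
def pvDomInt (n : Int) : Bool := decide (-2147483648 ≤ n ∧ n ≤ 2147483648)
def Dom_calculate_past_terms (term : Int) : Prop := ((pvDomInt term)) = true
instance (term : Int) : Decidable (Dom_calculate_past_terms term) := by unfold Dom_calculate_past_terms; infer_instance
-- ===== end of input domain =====

-- B computes each past term by direct index arithmetic (idx = year*2 + [half==2]) instead of A's
-- stateful half/year decrement loop; same cost, different decomposition.

-- ===== PORT A =====
-- A's loop body: one step of the half/year state machine plus the f-string append.
def pvStepA (s : Int × Int × List String) (_ : Int) : Int × Int × List String :=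
  let (year, half, past) := s
  if half = 2 then
    (year, 1, past ++ [String.ofList (PySem.Int.toChars year ++ PySem.Int.toChars 1)])
  else
    (year - 1, 2, past ++ [String.ofList (PySem.Int.toChars (year - 1) ++ PySem.Int.toChars 2)])

def calculate_past_terms (term : Int) : String × List String :=
  let nt := PySem.List.slice (PySem.Int.toChars term) (some 1) (some 5)
  match PySem.Int.ofChars? (PySem.List.slice nt none (some 3)), PySem.List.pyGet? nt 3 with
  | some year, some hc =>
    match PySem.Int.ofChars? [hc] with
    | some half =>
      let st := (PySem.List.pyRange 0 4 1).foldl pvStepA (year, half, [])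
      (String.ofList nt, st.2.2)
    | none => ("", [])  -- int() ValueError: Python raises here; excluded by Pre_
  | _, _ => ("", [])    -- slicing/indexing failed: Python raises here; excluded by Pre_

-- ===== PORT B =====
def calculate_past_terms_alt (term : Int) : String × List String :=
  let nt := PySem.List.slice (PySem.Int.toChars term) (some 1) (some 5)
  match PySem.Int.ofChars? (PySem.List.slice nt none (some 3)) with
  | none => ("", [])    -- int() ValueError: Python raises here; excluded by Pre_
  | some year =>
    match PySem.List.pyGet? nt 3 with
    | none => ("", [])  -- IndexError: Python raises here; excluded by Pre_
    | some hc =>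
      match PySem.Int.ofChars? [hc] with
      | none => ("", [])
      | some half =>
        let idx := year * 2 + (if half = 2 then 1 else 0)
        let past := (PySem.List.pyRange 1 5 1).map (fun j =>
          String.ofList (PySem.Int.toChars (PySem.Int.floordiv (idx - j) 2) ++
                         PySem.Int.toChars (PySem.Int.mod (idx - j) 2 + 1)))
        (String.ofList nt, past)

-- ===== PRECONDITION & SPEC =====
-- Exactly the inputs where Python A returns: str(term) needs ≥ 5 characters after the first,
-- i.e. term ≥ 10000 or term ≤ -1000; otherwise int('')/new_term[3] raises ValueError/IndexError.
def Pre_calculate_past_terms (term : Int) : Prop := 10000 ≤ term ∨ term ≤ -1000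
instance (term : Int) : Decidable (Pre_calculate_past_terms term) := by unfold Pre_calculate_past_terms; infer_instance
def pvWitness_calculate_past_terms : Int := 202510

def Spec_calculate_past_terms (term : Int) (out : String × List String) : Prop := out = calculate_past_terms_alt term
instance (term : Int) (out : String × List String) : Decidable (Spec_calculate_past_terms term out) := by unfold Spec_calculate_past_terms; infer_instance

-- ===== CLAIM (what is proved, stated in full; the proofs are below) =====
def Claim_equal_calculate_past_terms : Prop := ∀ (term : Int), Dom_calculate_past_terms term → Pre_calculate_past_terms term → Spec_calculate_past_terms term (calculate_past_terms term)

-- ===== LEMMAS AND PROOFS =====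

-- The core fact: A's 4-step state machine emits exactly B's four index-arithmetic terms.
theorem loop_eq_map (year half : Int) :
    ((PySem.List.pyRange 0 4 1).foldl pvStepA (year, half, [])).2.2 =
      (PySem.List.pyRange 1 5 1).map (fun j =>
        String.ofList (PySem.Int.toChars (PySem.Int.floordiv (year * 2 + (if half = 2 then 1 else 0) - j) 2) ++
                       PySem.Int.toChars (PySem.Int.mod (year * 2 + (if half = 2 then 1 else 0) - j) 2 + 1))) := by
  have h04 : PySem.List.pyRange 0 4 1 = [0, 1, 2, 3] := by decide
  have h15 : PySem.List.pyRange 1 5 1 = [1, 2, 3, 4] := by decide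
  rw [h04, h15]
  by_cases hh : half = 2 <;> simp [List.foldl, List.map, pvStepA, hh]
  all_goals and_intros <;> ((congr 2 <;> try omega); all_goals (congr 1 <;> omega))

-- ===== VERDICT (by name: the statement is the Claim_ definition above) =====
theorem calculate_past_terms_spec : Claim_equal_calculate_past_terms := by
  intro term _ _
  unfold Spec_calculate_past_terms calculate_past_terms calculate_past_terms_alt
  generalize (PySem.List.slice (PySem.Int.toChars term) (some 1) (some 5)) = nt
  cases h1 : PySem.Int.ofChars? (PySem.List.slice nt none (some 3)) with
  | none => cases h2 : PySem.List.pyGet? nt 3 <;> simp only [h1, h2]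
  | some year =>
    cases h2 : PySem.List.pyGet? nt 3 with
    | none => simp only [h1, h2]
    | some hc =>
      cases h3 : PySem.Int.ofChars? [hc] with
      | none => simp only [h1, h2, h3]
      | some half => simp only [h1, h2, h3]; exact congrArg (Prod.mk _) (loop_eq_map year half)
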